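-- pv_equiv track=rewrite | github.com/jackberrypassionfruit/advent_of_code_2023 | day_01/src/python/test.py | find_all_digits_in_this_row
-- ===== SOURCE A (Python) =====
-- digits = {
--     'one':      1,
--     'two':      2,
--     'three':    3,
--     'four':     4,
--     'five':     5,
--     'six':      6,
--     'seven':    7,
--     'eight':    8,
--     'nine':     9,
--     'zero':     0
-- }
--
-- def find_all_digits_in_this_row(row):
--     found_this_row = []
--     for digit_str in digits.keys():
--         try:
--             index = row.index(digit_str)
--             found_this_row.append((index, digit_str))
--         except ValueError:
--             pass
--     found_this_row.sort(key=lambda pair: pair[0])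
--     return found_this_row
-- ===== SOURCE B (Python) =====
-- DIGIT_WORDS = ('one', 'two', 'three', 'four', 'five',
--                'six', 'seven', 'eight', 'nine', 'zero')
--
-- def find_all_digits_in_this_row(row):
--     # Single left-to-right scan: at each position, record any digit word that
--     # starts there and has not been seen yet. The output is built already in
--     # ascending-index order, so no sort is needed.
--     found = []
--     seen = set()
--     for i in range(len(row)):
--         for word in DIGIT_WORDS:
--             if word not in seen and row.startswith(word, i):
--                 seen.add(word)
--                 found.append((i, word))
--     return found
-- ===== Notes on version B (the rewrite author's own statement) =====
-- stated objective: alternative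
-- what changed: Replaced per-word str.index searches followed by a sort with a single left-to-right scan that tests startswith at each position and records each word's first occurrence in ascending-index order, so no sort is needed.
import Mathlib
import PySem

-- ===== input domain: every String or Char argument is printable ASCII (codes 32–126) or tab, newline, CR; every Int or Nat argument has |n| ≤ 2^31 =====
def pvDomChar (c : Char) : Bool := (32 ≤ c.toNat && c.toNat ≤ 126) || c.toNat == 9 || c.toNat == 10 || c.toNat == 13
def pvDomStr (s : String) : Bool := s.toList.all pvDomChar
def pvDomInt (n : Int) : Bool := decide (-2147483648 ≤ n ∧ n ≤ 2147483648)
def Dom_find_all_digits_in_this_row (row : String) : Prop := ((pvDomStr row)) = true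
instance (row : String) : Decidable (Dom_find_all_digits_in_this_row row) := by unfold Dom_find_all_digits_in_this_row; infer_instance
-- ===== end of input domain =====

-- B replaces A's ten str.index searches + sort by a single left-to-right scan recording each
-- word's first occurrence in ascending-index order (objective: alternative; return value only).

-- ===== PORT A =====
-- the module-level dict 'digits' (only its keys, in insertion order, matter to A)
def pvDigits : PySem.Dict String Int :=
  PySem.Dict.ofList [("one", 1), ("two", 2), ("three", 3), ("four", 4), ("five", 5),
                     ("six", 6), ("seven", 7), ("eight", 8), ("nine", 9), ("zero", 0)]

-- 'row.index(w)' raises ValueError iff 'row.find(w) = -1'; the try/except is the if below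
def find_all_digits_in_this_row (row : String) : List (Int × String) :=
  let found_this_row := (PySem.Dict.keys pvDigits).foldl
    (fun acc digit_str =>
      let index := PySem.Str.find row digit_str
      if index = -1 then acc else acc ++ [(index, digit_str)])
    []
  PySem.List.sorted found_this_row (fun pair => pair.1) false

-- ===== PORT B =====
def pvDigitWords : List String :=
  ["one", "two", "three", "four", "five", "six", "seven", "eight", "nine", "zero"]

-- 'row.startswith(word, i)' for the 0 ≤ i < len(row) produced by range is exactly
-- 'word.toList <+: row.toList.drop i.toNat' (ported via Chars.startswith on the dropped tail)
def find_all_digits_in_this_row_alt (row : String) : List (Int × String) :=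
  let st := (PySem.List.pyRange 0 (PySem.Str.len row) 1).foldl
    (fun (st : List (Int × String) × PySem.Set String) i =>
      pvDigitWords.foldl
        (fun (st : List (Int × String) × PySem.Set String) word =>
          if !(PySem.Set.contains st.2 word) &&
              PySem.Chars.startswith (row.toList.drop i.toNat) word.toList
          then (st.1 ++ [(i, word)], PySem.Set.add st.2 word)
          else st)
        st)
    ([], PySem.Set.empty)
  st.1

-- ===== PRECONDITION & SPEC =====
def Spec_find_all_digits_in_this_row (row : String) (out : List (Int × String)) : Prop := out = find_all_digits_in_this_row_alt row
instance (row : String) (out : List (Int × String)) : Decidable (Spec_find_all_digits_in_this_row row out) := by unfold Spec_find_all_digits_in_this_row; infer_instance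

-- ===== CLAIM (what is proved, stated in full; the proofs are below) =====
def Claim_equal_find_all_digits_in_this_row : Prop := ∀ (row : String), Dom_find_all_digits_in_this_row row → Spec_find_all_digits_in_this_row row (find_all_digits_in_this_row row)

-- ===== LEMMAS AND PROOFS =====

-- the block of pairs B emits at scan position i: the words whose first occurrence is i
def pvBlk (cs : List Char) (i : Int) : List (Int × String) :=
  (pvDigitWords.filter (fun w => PySem.Chars.find cs w.toList == i)).map (fun w => (i, w))

def pvCanon (cs : List Char) (k : Nat) : List (Int × String) :=
  (List.range k).flatMap (fun (i : Nat) => pvBlk cs (i : Int))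

-- A's loop is filter+map
theorem pvFoldA (l : List String) (g : String → Int) (acc : List (Int × String)) :
    l.foldl (fun acc w => let index := g w; if index = -1 then acc else acc ++ [(index, w)]) acc
      = acc ++ (l.filter (fun w => !(g w == -1))).map (fun w => (g w, w)) := by
  induction l generalizing acc with
  | nil => simp
  | cons w l ih =>
    by_cases h : g w = -1 <;> simp [h, ih]

-- no digit word is a prefix of a different digit word
theorem pvNoPrefix : ∀ w1 ∈ pvDigitWords, ∀ w2 ∈ pvDigitWords,
    w1.toList <+: w2.toList → w1 = w2 := by decide

theorem pvWordsNodup : pvDigitWords.Nodup := by decide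

theorem pvWordsNe : ∀ w ∈ pvDigitWords, w.toList ≠ [] := by decide

-- find = i (0 ≤ i) iff w occurs at i and at no earlier position
theorem pvFindEq (cs w : List Char) (i : Nat) :
    PySem.Chars.find cs w = (i : Int) ↔
      (w <+: cs.drop i ∧ ∀ j < i, ¬ w <+: cs.drop j) := by
  constructor
  · intro h
    have h0 : (0:Int) ≤ PySem.Chars.find cs w := by rw [h]; positivity
    obtain ⟨h1, h2⟩ := PySem.Chars.find_spec (s := cs) (sub := w) h0
    rw [h] at h1 h2
    simpa using ⟨h1, h2⟩
  · rintro ⟨h1, h2⟩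
    have hocc : w <:+: cs :=
      (PySem.Chars.isIn_iff_infix w cs).mp
        ((PySem.Chars.exists_prefix_drop_iff_isIn (sub := w) (s := cs)).mp ⟨i, h1⟩)
    have h0 : (0:Int) ≤ PySem.Chars.find cs w := (PySem.Chars.find_nonneg_iff cs w).mpr hocc
    obtain ⟨hp, hmin⟩ := PySem.Chars.find_spec (s := cs) (sub := w) h0
    have hle : (PySem.Chars.find cs w).toNat ≤ i := by
      by_contra hlt
      exact hmin i (by omega) h1
    have hge : i ≤ (PySem.Chars.find cs w).toNat := by
      by_contra hlt
      exact h2 _ (by omega) hp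
    omega

-- an occurrence at j bounds the first occurrence
theorem pvPrefFind (cs w : List Char) (j : Nat) (h : w <+: cs.drop j) :
    PySem.Chars.find cs w ≠ -1 ∧ (PySem.Chars.find cs w).toNat ≤ j := by
  have hocc : w <:+: cs :=
    (PySem.Chars.isIn_iff_infix w cs).mp
      ((PySem.Chars.exists_prefix_drop_iff_isIn (sub := w) (s := cs)).mp ⟨j, h⟩)
  have h0 : (0:Int) ≤ PySem.Chars.find cs w := (PySem.Chars.find_nonneg_iff cs w).mpr hocc
  obtain ⟨hp, hmin⟩ := PySem.Chars.find_spec (s := cs) (sub := w) h0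
  refine ⟨by omega, ?_⟩
  by_contra hlt
  exact hmin j (by omega) h

-- inner loop: processing the word list at position i appends exactly the block at i
theorem pvInner (cs : List Char) (i : Nat) (ws : List String) (hnd : ws.Nodup)
    (found : List (Int × String)) (s : PySem.Set String)
    (hs : ∀ w ∈ ws, (PySem.Set.contains s w = true ↔
        PySem.Chars.find cs w.toList ≠ -1 ∧ (PySem.Chars.find cs w.toList).toNat < i)) :
    ∃ s', ws.foldl
        (fun (st : List (Int × String) × PySem.Set String) word =>
          if !(PySem.Set.contains st.2 word) &&
              PySem.Chars.startswith (cs.drop (i : Int).toNat) word.toList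
          then (st.1 ++ [((i : Int), word)], PySem.Set.add st.2 word)
          else st)
        (found, s)
      = (found ++ (ws.filter (fun w => PySem.Chars.find cs w.toList == (i:Int))).map
            (fun w => ((i : Int), w)), s')
      ∧ ∀ w, (PySem.Set.contains s' w = true ↔
          PySem.Set.contains s w = true ∨ (w ∈ ws ∧ PySem.Chars.find cs w.toList = (i:Int))) := by
  induction ws generalizing found s with
  | nil => exact ⟨s, by simp⟩
  | cons w0 ws ih =>
    have hnd' : ws.Nodup := (List.nodup_cons.mp hnd).2
    have hw0 : w0 ∉ ws := (List.nodup_cons.mp hnd).1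
    have hs0 := hs w0 (List.mem_cons_self ..)
    have hiff : (!(PySem.Set.contains s w0) &&
        PySem.Chars.startswith (cs.drop (i:Int).toNat) w0.toList) = true ↔
        PySem.Chars.find cs w0.toList = (i:Int) := by
      rw [Bool.and_eq_true, Bool.not_eq_true', PySem.Chars.startswith_iff, pvFindEq]
      constructor
      · rintro ⟨hc, hpre⟩
        have hpre' : w0.toList <+: cs.drop i := by simpa using hpre
        refine ⟨hpre', fun j hj hpj => ?_⟩
        obtain ⟨hne, hle⟩ := pvPrefFind cs w0.toList j hpj
        have hct : PySem.Set.contains s w0 = true := hs0.mpr ⟨hne, by omega⟩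
        rw [hct] at hc
        exact absurd hc (by simp)
      · rintro ⟨hpre, hmin⟩
        refine ⟨?_, by simpa using hpre⟩
        cases h : PySem.Set.contains s w0
        · rfl
        · exfalso
          obtain ⟨hne, hlt⟩ := hs0.mp h
          have h0 : (0:Int) ≤ PySem.Chars.find cs w0.toList := by
            have := PySem.Chars.neg_one_le_find cs w0.toList; omega
          obtain ⟨hp, -⟩ := PySem.Chars.find_spec (s := cs) (sub := w0.toList) h0
          exact hmin _ hlt hp
    by_cases hfind : PySem.Chars.find cs w0.toList = (i:Int)
    · have htest : (!(PySem.Set.contains s w0) &&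
          PySem.Chars.startswith (cs.drop (i:Int).toNat) w0.toList) = true := hiff.mpr hfind
      have hs' : ∀ w ∈ ws, (PySem.Set.contains (PySem.Set.add s w0) w = true ↔
          PySem.Chars.find cs w.toList ≠ -1 ∧ (PySem.Chars.find cs w.toList).toNat < i) := by
        intro w hw
        have hne : w ≠ w0 := fun h => hw0 (h ▸ hw)
        rw [PySem.Set.contains_iff, PySem.Set.mem_add, ← PySem.Set.contains_iff]
        simp only [hne, or_false]
        exact hs w (List.mem_cons_of_mem _ hw)
      obtain ⟨s', heq, hmem⟩ := ih hnd' (found ++ [((i:Int), w0)]) (PySem.Set.add s w0) hs'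
      refine ⟨s', ?_, ?_⟩
      · rw [List.foldl_cons]
        have hstep : (if (!(PySem.Set.contains s w0) &&
              PySem.Chars.startswith (cs.drop (i:Int).toNat) w0.toList) = true
            then (found ++ [((i:Int), w0)], PySem.Set.add s w0)
            else (found, s)) = (found ++ [((i:Int), w0)], PySem.Set.add s w0) :=
          if_pos htest
        simp only []
        rw [hstep, heq]
        have hb : (PySem.Chars.find cs w0.toList == (i:Int)) = true := by simp [hfind]
        simp [hb, List.append_assoc]
      · intro w
        rw [hmem w, PySem.Set.contains_iff, PySem.Set.mem_add, ← PySem.Set.contains_iff]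
        constructor
        · rintro ((h | h) | ⟨hw, hf⟩)
          · exact Or.inl h
          · exact Or.inr ⟨by simp [h], h ▸ hfind⟩
          · exact Or.inr ⟨List.mem_cons_of_mem _ hw, hf⟩
        · rintro (h | ⟨hw, hf⟩)
          · exact Or.inl (Or.inl h)
          · rcases List.mem_cons.mp hw with h | h
            · exact Or.inl (Or.inr h)
            · exact Or.inr ⟨h, hf⟩
    · have htest : (!(PySem.Set.contains s w0) &&
          PySem.Chars.startswith (cs.drop (i:Int).toNat) w0.toList) = false := by
        cases h : (!(PySem.Set.contains s w0) &&
          PySem.Chars.startswith (cs.drop (i:Int).toNat) w0.toList)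
        · rfl
        · exact absurd (hiff.mp h) hfind
      have hs' : ∀ w ∈ ws, (PySem.Set.contains s w = true ↔
          PySem.Chars.find cs w.toList ≠ -1 ∧ (PySem.Chars.find cs w.toList).toNat < i) :=
        fun w hw => hs w (List.mem_cons_of_mem _ hw)
      obtain ⟨s', heq, hmem⟩ := ih hnd' found s hs'
      refine ⟨s', ?_, ?_⟩
      · rw [List.foldl_cons]
        have hstep : (if (!(PySem.Set.contains s w0) &&
              PySem.Chars.startswith (cs.drop (i:Int).toNat) w0.toList) = true
            then (found ++ [((i:Int), w0)], PySem.Set.add s w0)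
            else (found, s)) = (found, s) :=
          if_neg (by rw [htest]; exact Bool.false_ne_true)
        simp only []
        rw [hstep, heq]
        have : (PySem.Chars.find cs w0.toList == (i:Int)) = false :=
          beq_eq_false_iff_ne.mpr hfind
        simp [this]
      · intro w
        rw [hmem w]
        constructor
        · rintro (h | ⟨hw, hf⟩)
          · exact Or.inl h
          · exact Or.inr ⟨List.mem_cons_of_mem _ hw, hf⟩
        · rintro (h | ⟨hw, hf⟩)
          · exact Or.inl h
          · rcases List.mem_cons.mp hw with h | h
            · exact absurd (h ▸ hf) hfind
            · exact Or.inr ⟨h, hf⟩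

-- outer loop invariant
set_option maxHeartbeats 1000000 in
theorem pvOuter (cs : List Char) (k : Nat) (hk : k ≤ cs.length) :
    ∃ s, (PySem.List.pyRange 0 (k : Int) 1).foldl
        (fun (st : List (Int × String) × PySem.Set String) i =>
          pvDigitWords.foldl
            (fun (st : List (Int × String) × PySem.Set String) word =>
              if !(PySem.Set.contains st.2 word) &&
                  PySem.Chars.startswith (cs.drop i.toNat) word.toList
              then (st.1 ++ [(i, word)], PySem.Set.add st.2 word)
              else st)
            st)
        ([], PySem.Set.empty)
      = (pvCanon cs k, s)
      ∧ ∀ w ∈ pvDigitWords, (PySem.Set.contains s w = true ↔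
          PySem.Chars.find cs w.toList ≠ -1 ∧ (PySem.Chars.find cs w.toList).toNat < k) := by
  induction k with
  | zero =>
    refine ⟨PySem.Set.empty, ?_, ?_⟩
    · rw [PySem.List.pyRange_one_eq_nil (by norm_num)]
      rfl
    · intro w _
      constructor
      · intro h; exact absurd h (by simp [PySem.Set.empty, PySem.Set.contains])
      · rintro ⟨-, h⟩; omega
  | succ k ih =>
    obtain ⟨s, heq, hmem⟩ := ih (by omega)
    have hsplit : PySem.List.pyRange 0 ((k+1 : Nat) : Int) 1
        = PySem.List.pyRange 0 (k : Int) 1 ++ [(k : Int)] := by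
      have : ((k+1 : Nat) : Int) = (k : Int) + 1 := by push_cast; ring
      rw [this, PySem.List.pyRange_one_succ_right (by positivity)]
    rw [hsplit, List.foldl_append, heq, List.foldl_cons, List.foldl_nil]
    obtain ⟨s', heq', hmem'⟩ := pvInner cs k pvDigitWords pvWordsNodup (pvCanon cs k) s hmem
    refine ⟨s', ?_, ?_⟩
    · rw [heq']
      have hc : pvCanon cs (k+1) = pvCanon cs k ++ pvBlk cs (k : Int) := by
        unfold pvCanon
        rw [List.range_succ, List.flatMap_append, List.flatMap_singleton]
      rw [hc]
      simp only [pvBlk]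
    · intro w hw
      rw [hmem' w, hmem w hw]
      have hneg := PySem.Chars.neg_one_le_find cs w.toList
      constructor
      · rintro (⟨h1, h2⟩ | ⟨-, h⟩)
        · exact ⟨h1, by omega⟩
        · refine ⟨by omega, by omega⟩
      · rintro ⟨h1, h2⟩
        rcases Nat.lt_succ_iff_lt_or_eq.mp h2 with h | h
        · exact Or.inl ⟨h1, h⟩
        · exact Or.inr ⟨hw, by omega⟩

-- a successful find lands strictly inside cs
theorem pvFindLt (cs : List Char) (w : String) (hw : w ∈ pvDigitWords)
    (h : PySem.Chars.find cs w.toList ≠ -1) :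
    (PySem.Chars.find cs w.toList).toNat < cs.length := by
  have hneg := PySem.Chars.neg_one_le_find cs w.toList
  have h0 : (0:Int) ≤ PySem.Chars.find cs w.toList := by omega
  obtain ⟨hp, -⟩ := PySem.Chars.find_spec (s := cs) (sub := w.toList) h0
  have hne := pvWordsNe w hw
  have : cs.drop (PySem.Chars.find cs w.toList).toNat ≠ [] := by
    intro hnil; rw [hnil] at hp; exact hne (List.prefix_nil.mp hp)
  have := List.drop_eq_nil_iff.not.mp this
  omega

-- generic: grouping a pair list by its (bounded) key value is a permutation of it
theorem pvPermAux (F : String → Int) (n : Nat) :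
    ∀ ws : List String, (∀ w ∈ ws, F w ≠ -1 → 0 ≤ F w ∧ (F w).toNat < n) →
    ((List.range n).flatMap (fun (i : Nat) =>
        (ws.filter (fun w => F w == (i:Int))).map (fun w => ((i:Int), w)))).Perm
      ((ws.filter (fun w => !(F w == -1))).map (fun w => (F w, w))) := by
  intro ws
  induction ws with
  | nil => intro _; simp
  | cons w0 ws ih =>
    intro hb
    have hbt : ∀ w ∈ ws, F w ≠ -1 → 0 ≤ F w ∧ (F w).toNat < n :=
      fun w hw => hb w (List.mem_cons_of_mem _ hw)
    by_cases h : F w0 = -1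
    · have hstep : ∀ i ∈ List.range n,
          ((w0 :: ws).filter (fun w => F w == (i:Int))).map (fun w => ((i:Int), w))
            = (ws.filter (fun w => F w == (i:Int))).map (fun w => ((i:Int), w)) := by
        intro i _
        rw [List.filter_cons]
        have hne : (F w0 == (i:Int)) = false := by
          simp only [beq_eq_false_iff_ne]; omega
        simp [hne]
      rw [List.flatMap_congr hstep, List.filter_cons]
      have hne : (!(F w0 == -1)) = false := by simp [h]
      rw [hne]
      exact ih hbt
    · have hneg0 : 0 ≤ F w0 := (hb w0 (List.mem_cons_self ..) h).1
      have hfk : F w0 = ((F w0).toNat : Int) := by omega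
      have hkn : (F w0).toNat < n := (hb w0 (List.mem_cons_self ..) h).2
      have hfg : ∀ (i : Nat), i ≠ (F w0).toNat →
          ((w0 :: ws).filter (fun w => F w == (i:Int))).map (fun w => ((i:Int), w))
            = (ws.filter (fun w => F w == (i:Int))).map (fun w => ((i:Int), w)) := by
        intro i hi
        rw [List.filter_cons]
        have hne : (F w0 == (i:Int)) = false := by
          simp only [beq_eq_false_iff_ne]; omega
        simp [hne]
      have hrange : List.range n = (List.range (F w0).toNat ++ [(F w0).toNat])
          ++ (List.range (n - ((F w0).toNat + 1))).map (fun j => ((F w0).toNat + 1) + j) := by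
      -- range n split at the key of w0
        have h1 : List.range n = List.range (((F w0).toNat + 1) + (n - ((F w0).toNat + 1))) := by
          congr 1; omega
        rw [h1, List.range_add, List.range_succ]
      have hfkblk : ((w0 :: ws).filter (fun w => F w == (((F w0).toNat : Nat):Int))).map
            (fun w => ((((F w0).toNat : Nat):Int), w))
          = ((((F w0).toNat : Nat):Int), w0)
              :: (ws.filter (fun w => F w == (((F w0).toNat : Nat):Int))).map
                  (fun w => ((((F w0).toNat : Nat):Int), w)) := by
        have ht : (F w0 == (((F w0).toNat : Nat):Int)) = true := by
          simp only [beq_iff_eq]; omega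
        rw [List.filter_cons, if_pos ht, List.map_cons]
      have hL1 : (List.range (F w0).toNat).flatMap (fun (i : Nat) =>
            ((w0 :: ws).filter (fun w => F w == (i:Int))).map (fun w => ((i:Int), w)))
          = (List.range (F w0).toNat).flatMap (fun (i : Nat) =>
            (ws.filter (fun w => F w == (i:Int))).map (fun w => ((i:Int), w))) :=
        List.flatMap_congr (fun i hi => hfg i (by have := List.mem_range.mp hi; omega))
      have hL2 : ((List.range (n - ((F w0).toNat + 1))).map
              (fun j => ((F w0).toNat + 1) + j)).flatMap (fun (i : Nat) =>
            ((w0 :: ws).filter (fun w => F w == (i:Int))).map (fun w => ((i:Int), w)))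
          = ((List.range (n - ((F w0).toNat + 1))).map
              (fun j => ((F w0).toNat + 1) + j)).flatMap (fun (i : Nat) =>
            (ws.filter (fun w => F w == (i:Int))).map (fun w => ((i:Int), w))) :=
        List.flatMap_congr (fun i hi => hfg i (by
          obtain ⟨j, -, rfl⟩ := List.mem_map.mp hi; omega))
      have hrhs : ((w0 :: ws).filter (fun w => !(F w == -1))).map (fun w => (F w, w))
          = ((((F w0).toNat : Nat):Int), w0)
              :: (ws.filter (fun w => !(F w == -1))).map (fun w => (F w, w)) := by
        have ht : (!(F w0 == -1)) = true := by simp [h]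
        rw [List.filter_cons, if_pos ht, List.map_cons, ← hfk]
      rw [hrange, List.flatMap_append, List.flatMap_append, List.flatMap_singleton,
        hfkblk, hL1, hL2, hrhs]
      have hmid : (List.range (F w0).toNat).flatMap (fun (i : Nat) =>
            (ws.filter (fun w => F w == (i:Int))).map (fun w => ((i:Int), w)))
          ++ (((((F w0).toNat : Nat):Int), w0)
              :: (ws.filter (fun w => F w == (((F w0).toNat : Nat):Int))).map
                  (fun w => ((((F w0).toNat : Nat):Int), w)))
          ++ ((List.range (n - ((F w0).toNat + 1))).map
              (fun j => ((F w0).toNat + 1) + j)).flatMap (fun (i : Nat) =>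
            (ws.filter (fun w => F w == (i:Int))).map (fun w => ((i:Int), w)))
          = (List.range (F w0).toNat).flatMap (fun (i : Nat) =>
            (ws.filter (fun w => F w == (i:Int))).map (fun w => ((i:Int), w)))
          ++ ((((F w0).toNat : Nat):Int), w0)
              :: ((ws.filter (fun w => F w == (((F w0).toNat : Nat):Int))).map
                  (fun w => ((((F w0).toNat : Nat):Int), w))
                ++ ((List.range (n - ((F w0).toNat + 1))).map
                    (fun j => ((F w0).toNat + 1) + j)).flatMap (fun (i : Nat) =>
                  (ws.filter (fun w => F w == (i:Int))).map (fun w => ((i:Int), w)))) := by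
        simp
      rw [hmid]
      refine List.Perm.trans List.perm_middle ?_
      refine List.Perm.cons _ ?_
      have hdecomp : (List.range n).flatMap (fun (i : Nat) =>
            (ws.filter (fun w => F w == (i:Int))).map (fun w => ((i:Int), w)))
          = (List.range (F w0).toNat).flatMap (fun (i : Nat) =>
            (ws.filter (fun w => F w == (i:Int))).map (fun w => ((i:Int), w)))
          ++ ((ws.filter (fun w => F w == (((F w0).toNat : Nat):Int))).map
                  (fun w => ((((F w0).toNat : Nat):Int), w))
              ++ ((List.range (n - ((F w0).toNat + 1))).map
                  (fun j => ((F w0).toNat + 1) + j)).flatMap (fun (i : Nat) =>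
                (ws.filter (fun w => F w == (i:Int))).map (fun w => ((i:Int), w)))) := by
        rw [hrange, List.flatMap_append, List.flatMap_append, List.flatMap_singleton,
          List.append_assoc]
      rw [← hdecomp]
      exact ih hbt

-- canonical list is a permutation of A's unsorted pair list
theorem pvPerm (cs : List Char) :
    (pvCanon cs cs.length).Perm
      ((pvDigitWords.filter (fun w => !(PySem.Chars.find cs w.toList == -1))).map
        (fun w => (PySem.Chars.find cs w.toList, w))) := by
  refine pvPermAux (fun w => PySem.Chars.find cs w.toList) cs.length pvDigitWords ?_
  intro w hw hne
  have hne' : PySem.Chars.find cs w.toList ≠ -1 := hne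
  refine ⟨?_, ?_⟩
  · show (0:Int) ≤ PySem.Chars.find cs w.toList
    have hneg := PySem.Chars.neg_one_le_find cs w.toList
    omega
  · show (PySem.Chars.find cs w.toList).toNat < cs.length
    exact pvFindLt cs w hw hne'

-- canonical list has strictly increasing indices
theorem pvPairwise (cs : List Char) (k : Nat) :
    (pvCanon cs k).Pairwise (fun a b => a.1 < b.1) := by
  unfold pvCanon
  rw [List.flatMap_def, List.pairwise_flatten]
  constructor
  · intro l' hl'
    obtain ⟨i, -, rfl⟩ := List.mem_map.mp hl'
    unfold pvBlk
    rw [List.pairwise_map]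
    have hnd : (pvDigitWords.filter
        (fun w => PySem.Chars.find cs w.toList == (i:Int))).Nodup :=
      pvWordsNodup.filter _
    refine hnd.imp_of_mem ?_
    intro a b ha hb hne
    exfalso
    obtain ⟨haW, hfa⟩ := List.mem_filter.mp ha
    obtain ⟨hbW, hfb⟩ := List.mem_filter.mp hb
    have hfa' : PySem.Chars.find cs a.toList = (i:Int) := beq_iff_eq.mp hfa
    have hfb' : PySem.Chars.find cs b.toList = (i:Int) := beq_iff_eq.mp hfb
    have hpa : a.toList <+: cs.drop i := ((pvFindEq cs a.toList i).mp hfa').1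
    have hpb : b.toList <+: cs.drop i := ((pvFindEq cs b.toList i).mp hfb').1
    rcases List.prefix_or_prefix_of_prefix hpa hpb with hp | hp
    · exact hne (pvNoPrefix a haW b hbW hp)
    · exact hne (pvNoPrefix b hbW a haW hp).symm
  · rw [List.pairwise_map]
    refine (List.pairwise_lt_range).imp_of_mem ?_
    intro i1 i2 _ _ hlt x hx y hy
    unfold pvBlk at hx hy
    obtain ⟨wx, -, rfl⟩ := List.mem_map.mp hx
    obtain ⟨wy, -, rfl⟩ := List.mem_map.mp hy
    show (i1:Int) < (i2:Int)
    exact_mod_cast hlt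

-- ===== VERDICT (by name: the statement is the Claim_ definition above) =====
theorem find_all_digits_in_this_row_spec : Claim_equal_find_all_digits_in_this_row := by
  intro row _
  unfold Spec_find_all_digits_in_this_row
  unfold find_all_digits_in_this_row find_all_digits_in_this_row_alt
  have hkeys : PySem.Dict.keys pvDigits = pvDigitWords := by decide
  rw [hkeys, pvFoldA pvDigitWords (fun w => PySem.Str.find row w) []]
  obtain ⟨s, heq, -⟩ := pvOuter row.toList row.toList.length le_rfl
  have hlen : PySem.Str.len row = ((row.toList.length : Nat) : Int) := by
    simp [PySem.Str.len]
  rw [hlen, heq]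
  simp only [List.nil_append]
  refine PySem.List.sorted_eq_of_perm_of_pairwise_lt _ _ _ ?_ ?_
  · have hp := pvPerm row.toList
    unfold pvCanon at hp ⊢
    simpa using hp
  · exact pvPairwise row.toList row.toList.length
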